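-- pv_equiv track=rewrite | github.com/Leet-Lyn/Python | .Backups/TextWordEditingByLine.py | delete_string_from_lines
-- ===== SOURCE A (Python) =====
-- def delete_string_from_lines(lines, string_to_delete, times_per_line):
--     """
--     从每行中删除指定字符（子串）若干次
--     times_per_line: 正数=正向删除，负数=逆向删除
--     """
--     new_lines = []
--     for line in lines:
--         if times_per_line >= 0:
--             # 正向删除
--             new_line = line
--             count = 0
--             start = 0
--             while count < times_per_line:
--                 idx = new_line.find(string_to_delete, start)
--                 if idx == -1:
--                     break
--                 new_line = new_line[:idx] + new_line[idx + len(string_to_delete):]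
--                 count += 1
--                 start = idx  # 保持原有查找逻辑（可能存在跳跃问题，但简单场景可用）
--             new_lines.append(new_line)
--         else:
--             # 逆向删除：反转字符串，删除子串也反转，再反转回来
--             rev_line = line[::-1]
--             rev_string = string_to_delete[::-1]
--             rev_times = -times_per_line
--             new_rev_line = rev_line
--             count = 0
--             start = 0
--             while count < rev_times:
--                 idx = new_rev_line.find(rev_string, start)
--                 if idx == -1:
--                     break
--                 new_rev_line = new_rev_line[:idx] + new_rev_line[idx + len(rev_string):]
--                 count += 1
--                 start = idx
--             new_line = new_rev_line[::-1]
--             new_lines.append(new_line)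
--     return new_lines
-- ===== SOURCE B (Python) =====
-- def delete_string_from_lines(lines, string_to_delete, times_per_line):
--     """Single left-to-right pass per line: skip the pattern (up to the limit)
--     wherever it starts, copy every other character. Negative limit = same pass
--     on the reversed line with the reversed pattern."""
--     def strip_once(text, pat, limit):
--         out = []
--         i = 0
--         left = limit
--         m = len(pat)
--         while i < len(text):
--             if left > 0 and m > 0 and text.startswith(pat, i):
--                 left -= 1
--                 i += m
--             else:
--                 out.append(text[i])
--                 i += 1
--         return ''.join(out)
--
--     if times_per_line >= 0:
--         return [strip_once(line, string_to_delete, times_per_line) for line in lines]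
--     rev_pat = string_to_delete[::-1]
--     return [strip_once(line[::-1], rev_pat, -times_per_line)[::-1] for line in lines]
-- ===== Notes on version B (the rewrite author's own statement) =====
-- stated objective: alternative
-- what changed: A repeatedly calls find and rebuilds the whole line by slicing after every deletion; B makes one left-to-right pass per line, skipping the pattern where it starts (up to the limit) and copying every other character, never rebuilding the string.
import Mathlib
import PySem

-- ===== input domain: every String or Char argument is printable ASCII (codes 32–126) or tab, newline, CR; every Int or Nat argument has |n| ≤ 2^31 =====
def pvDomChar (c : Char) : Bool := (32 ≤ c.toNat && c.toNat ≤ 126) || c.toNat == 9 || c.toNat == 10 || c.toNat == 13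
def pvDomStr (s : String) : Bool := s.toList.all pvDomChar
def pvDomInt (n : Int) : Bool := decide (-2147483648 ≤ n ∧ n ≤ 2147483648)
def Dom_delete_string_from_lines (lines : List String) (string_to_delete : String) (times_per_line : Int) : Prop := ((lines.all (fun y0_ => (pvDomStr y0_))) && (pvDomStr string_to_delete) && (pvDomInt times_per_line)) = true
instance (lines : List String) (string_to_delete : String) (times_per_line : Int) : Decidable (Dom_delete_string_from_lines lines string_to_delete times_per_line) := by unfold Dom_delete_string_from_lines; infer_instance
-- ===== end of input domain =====

-- B replaces A's repeated find-and-splice (rebuilding the line after every deletion)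
-- by one left-to-right pass per line that skips the pattern where it starts; objective: alternative.


-- ===== PORT A =====
-- A's while loop `while count < times: idx = new_line.find(pat, start); …` —
-- fuel = number of remaining iterations (count runs from 0 to times), state = (new_line, start).
def pvALoop (pat : List Char) : Nat → List Char → Int → List Char
  | 0, cur, _ => cur
  | fuel + 1, cur, start =>
    let idx := PySem.Chars.findFrom cur pat start none
    if idx = -1 then cur
    else pvALoop pat fuel
      (PySem.List.slice cur none (some idx) ++
       PySem.List.slice cur (some (idx + (pat.length : Int))) none) idx

def delete_string_from_lines (lines : List String) (string_to_delete : String) (times_per_line : Int) : List String :=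
  lines.foldl (fun new_lines line =>
    if times_per_line ≥ 0 then
      new_lines ++ [String.ofList (pvALoop string_to_delete.toList times_per_line.toNat line.toList 0)]
    else
      -- line[::-1] / string_to_delete[::-1] are List.reverse (PySem.Chars.slice?_none_none_neg_one)
      new_lines ++ [String.ofList (pvALoop string_to_delete.toList.reverse (-times_per_line).toNat line.toList.reverse 0).reverse]) []

-- ===== PORT B =====
-- Source B's strip_once: one pass over the text, skipping the pattern where it starts, up to `left` times.
def pvBStrip (pat : List Char) : List Char → Nat → List Char
  | [], _ => []
  | c :: rest, left =>
    if 0 < left ∧ pat ≠ [] ∧ PySem.Chars.startswith (c :: rest) pat then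
      pvBStrip pat (List.drop (pat.length - 1) rest) (left - 1)
    else
      c :: pvBStrip pat rest left
termination_by l _ => l.length
decreasing_by
  · simp only [List.length_drop, List.length_cons]; omega
  · simp only [List.length_cons]; omega

def delete_string_from_lines_alt (lines : List String) (string_to_delete : String) (times_per_line : Int) : List String :=
  if times_per_line ≥ 0 then
    lines.map (fun line => String.ofList (pvBStrip string_to_delete.toList line.toList times_per_line.toNat))
  else
    lines.map (fun line => String.ofList (pvBStrip string_to_delete.toList.reverse line.toList.reverse (-times_per_line).toNat).reverse)

-- ===== PRECONDITION & SPEC =====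
def Spec_delete_string_from_lines (lines : List String) (string_to_delete : String) (times_per_line : Int) (out : List String) : Prop := out = delete_string_from_lines_alt lines string_to_delete times_per_line
instance (lines : List String) (string_to_delete : String) (times_per_line : Int) (out : List String) : Decidable (Spec_delete_string_from_lines lines string_to_delete times_per_line out) := by unfold Spec_delete_string_from_lines; infer_instance

-- ===== CLAIM (what is proved, stated in full; the proofs are below) =====
def Claim_equal_delete_string_from_lines : Prop := ∀ (lines : List String) (string_to_delete : String) (times_per_line : Int), Dom_delete_string_from_lines lines string_to_delete times_per_line → Spec_delete_string_from_lines lines string_to_delete times_per_line (delete_string_from_lines lines string_to_delete times_per_line)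

-- ===== LEMMAS AND PROOFS =====

theorem pvBStrip_zero (pat : List Char) (l : List Char) : pvBStrip pat l 0 = l := by
  induction l with
  | nil => rw [pvBStrip]
  | cons c rest ih => rw [pvBStrip]; simp [ih]

theorem pvBStrip_nilpat (l : List Char) (left : Nat) : pvBStrip [] l left = l := by
  induction l with
  | nil => rw [pvBStrip]
  | cons c rest ih => rw [pvBStrip]; simp [ih]

theorem pvBStrip_no_occ (pat t : List Char) (left : Nat) (h : ¬ pat <:+: t) :
    pvBStrip pat t left = t := by
  induction t with
  | nil => rw [pvBStrip]
  | cons c rest ih =>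
    rw [pvBStrip]
    have hns : ¬ (PySem.Chars.startswith (c :: rest) pat = true) := by
      rw [PySem.Chars.startswith_iff]
      exact fun hp => h hp.isInfix
    rw [if_neg (by tauto)]
    rw [ih (fun hi => h (hi.trans (List.suffix_cons c rest).isInfix))]

theorem pvBStrip_first_occ (pat : List Char) (hpat : pat ≠ []) :
    ∀ (j : Nat) (t : List Char) (left : Nat), 0 < left →
    (∀ i, i < j → ¬ pat <+: t.drop i) → pat <+: t.drop j →
    pvBStrip pat t left = t.take j ++ pvBStrip pat (t.drop (j + pat.length)) (left - 1) := by
  rcases pat with _ | ⟨p0, ps⟩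
  · exact absurd rfl hpat
  intro j
  induction j with
  | zero =>
    intro t left hleft _ hj
    simp only [List.drop_zero] at hj
    obtain ⟨c, rest, rfl⟩ : ∃ c rest, t = c :: rest := by
      rcases t with _ | ⟨c, rest⟩
      · exact absurd (List.eq_nil_of_prefix_nil hj) hpat
      · exact ⟨c, rest, rfl⟩
    rw [pvBStrip, if_pos ⟨hleft, hpat, (PySem.Chars.startswith_iff _ _).mpr hj⟩]
    simp [List.drop_succ_cons]
  | succ j ih =>
    intro t left hleft hmin hj
    obtain ⟨c, rest, rfl⟩ : ∃ c rest, t = c :: rest := by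
      rcases t with _ | ⟨c, rest⟩
      · rw [List.drop_nil] at hj
        exact absurd (List.eq_nil_of_prefix_nil hj) hpat
      · exact ⟨c, rest, rfl⟩
    have hns : ¬ (PySem.Chars.startswith (c :: rest) (p0 :: ps) = true) := by
      rw [PySem.Chars.startswith_iff]
      simpa using hmin 0 (Nat.succ_pos j)
    rw [pvBStrip, if_neg (by tauto)]
    rw [List.drop_succ_cons] at hj
    have := ih rest left hleft (fun i hi => by simpa using hmin (i + 1) (by omega)) hj
    rw [this]
    simp [Nat.succ_add, List.take_succ_cons]

theorem pvALoop_nilpat (fuel : Nat) : ∀ (cur : List Char) (k : Nat), k ≤ cur.length →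
    pvALoop [] fuel cur (k : Int) = cur := by
  induction fuel with
  | zero => intro cur k hk; rfl
  | succ fuel ih =>
    intro cur k hk
    rw [pvALoop]
    by_cases h : PySem.Chars.findFrom cur [] (k : Int) = -1
    · simp [h]
    · have hspec := PySem.Chars.findFrom_natCast_spec cur [] k hk h
      have hidx : PySem.Chars.findFrom cur [] (k : Int) = (k : Int) := by
        rcases hspec with ⟨h1, _, h3⟩
        have : (PySem.Chars.findFrom cur [] (k : Int)).toNat ≤ k := by
          by_contra hc
          exact h3 k (le_refl k) (by omega) (List.nil_prefix)
        omega
      simp only [hidx]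
      have : PySem.List.slice cur none (some (k : Int)) ++
          PySem.List.slice cur (some ((k : Int) + ((List.length ([] : List Char)) : Int))) none = cur := by
        simp only [List.length_nil, Nat.cast_zero, add_zero]
        rw [PySem.List.slice_to_natCast, PySem.List.slice_from_natCast]
        exact List.take_append_drop k cur
      rw [this]
      exact ih cur k hk

theorem pvALoop_eq_pvBStrip (pat : List Char) (hpat : pat ≠ []) (fuel : Nat) :
    ∀ (cur : List Char) (k : Nat), k ≤ cur.length →
    pvALoop pat fuel cur (k : Int) = cur.take k ++ pvBStrip pat (cur.drop k) fuel := by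
  induction fuel with
  | zero => intro cur k hk; rw [pvALoop, pvBStrip_zero, List.take_append_drop]
  | succ fuel ih =>
    intro cur k hk
    rw [pvALoop]
    by_cases h : PySem.Chars.findFrom cur pat (k : Int) = -1
    · rw [if_pos (by simpa using h)]
      rw [pvBStrip_no_occ pat _ _ ((PySem.Chars.findFrom_natCast_eq_neg_one_iff cur pat k hk).mp h)]
      rw [List.take_append_drop]
    · obtain ⟨h1, h2, h3⟩ := PySem.Chars.findFrom_natCast_spec cur pat k hk h
      set n : Nat := (PySem.Chars.findFrom cur pat (k : Int)).toNat with hn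
      have hidx : PySem.Chars.findFrom cur pat (k : Int) = (n : Int) := by omega
      have hkn : k ≤ n := by omega
      have hnlen : n < cur.length := by
        have hne : cur.drop n ≠ [] := fun he => hpat (List.eq_nil_of_prefix_nil (he ▸ h2))
        by_contra hc
        exact hne (List.drop_eq_nil_of_le (by omega))
      simp only [hidx]
      have hslice : PySem.List.slice cur none (some (n : Int)) ++
          PySem.List.slice cur (some ((n : Int) + ((pat.length : Nat) : Int))) none =
          cur.take n ++ cur.drop (n + pat.length) := by
        rw [PySem.List.slice_to_natCast]
        rw [show ((n : Int) + ((pat.length : Nat) : Int)) = (((n + pat.length : Nat)) : Int) by push_cast; ring]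
        rw [PySem.List.slice_from_natCast]
      rw [hslice]
      have hlen_take : (cur.take n).length = n := by simp; omega
      have hrec := ih (cur.take n ++ cur.drop (n + pat.length)) n
        (by simp only [List.length_append, hlen_take]; omega)
      rw [hrec]
      rw [List.take_left' hlen_take, List.drop_left' hlen_take]
      rw [pvBStrip_first_occ pat hpat (n - k) (cur.drop k) (fuel + 1) (Nat.succ_pos fuel)
        (fun i hi => by
          rw [List.drop_drop]
          have := h3 (k + i) (by omega) (by omega)
          simpa using this)
        (by rw [List.drop_drop, Nat.add_sub_cancel' hkn]; exact h2)]
      rw [List.drop_drop, ← List.append_assoc, ← List.take_add]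
      have e1 : k + (n - k) = n := by omega
      have e2 : k + (n - k + pat.length) = n + pat.length := by omega
      rw [e1, e2]
      simp

theorem pvLine_eq (pat l : List Char) (fuel : Nat) :
    pvALoop pat fuel l 0 = pvBStrip pat l fuel := by
  rcases eq_or_ne pat [] with h | h
  · subst h
    rw [pvBStrip_nilpat]
    exact_mod_cast pvALoop_nilpat fuel l 0 (Nat.zero_le _)
  · have := pvALoop_eq_pvBStrip pat h fuel l 0 (Nat.zero_le _)
    simpa using this

-- ===== VERDICT (by name: the statement is the Claim_ definition above) =====
theorem delete_string_from_lines_spec : Claim_equal_delete_string_from_lines := by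
  intro lines s t _
  unfold Spec_delete_string_from_lines delete_string_from_lines delete_string_from_lines_alt
  by_cases ht : t ≥ 0
  · simp only [ht, if_pos]
    rw [PySem.List.foldl_append_singleton_eq_map]
    simp [pvLine_eq]
  · simp only [ht, if_false]
    rw [PySem.List.foldl_append_singleton_eq_map]
    simp [pvLine_eq]
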